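-- pv_equiv track=rewrite | github.com/rafid5/emoji-sentiment-indicator-anonymous | sentiment_algorithms_by_standalone_emoji.py | method_repeated
-- ===== SOURCE A (Python) =====
-- def method_repeated(list_emoji, dict_sent):
--     '''
--     list_emoji: the list of emojis
--     dict_sent: dictionary with key of emoji, value of "+1, 0, or -1"
--     '''
--     sentiment = 0
--     emojis_set = set()
--     emojis_repeated_set = set()
--     for i in range(len(list_emoji)):
--         if list_emoji[i] in emojis_set and list_emoji[i] in dict_sent:
--             sentiment += dict_sent[list_emoji[i]]
--             emojis_repeated_set.add(list_emoji[i])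
--         else:
--             emojis_set.add(list_emoji[i])
--     #Adding weight for the first occurence of repeated emojis
--     for emoji in set(emojis_repeated_set):
--         sentiment += dict_sent[emoji]
--     return sentiment
-- ===== SOURCE B (Python) =====
-- def method_repeated(list_emoji, dict_sent):
--     counts = {}
--     for e in list_emoji:
--         counts[e] = counts.get(e, 0) + 1
--     sentiment = 0
--     for e, c in counts.items():
--         if c >= 2 and e in dict_sent:
--             sentiment += c * dict_sent[e]
--     return sentiment
-- ===== Notes on version B (the rewrite author's own statement) =====
-- stated objective: simpler
-- what changed: Replaces A's two-set incremental tracking (seen set, repeated set, per-occurrence additions plus a final pass over the repeated set) with a single frequency table: count occurrences once, then add c * dict_sent[e] for each emoji with c >= 2 that has a sentiment entry.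
import Mathlib
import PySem

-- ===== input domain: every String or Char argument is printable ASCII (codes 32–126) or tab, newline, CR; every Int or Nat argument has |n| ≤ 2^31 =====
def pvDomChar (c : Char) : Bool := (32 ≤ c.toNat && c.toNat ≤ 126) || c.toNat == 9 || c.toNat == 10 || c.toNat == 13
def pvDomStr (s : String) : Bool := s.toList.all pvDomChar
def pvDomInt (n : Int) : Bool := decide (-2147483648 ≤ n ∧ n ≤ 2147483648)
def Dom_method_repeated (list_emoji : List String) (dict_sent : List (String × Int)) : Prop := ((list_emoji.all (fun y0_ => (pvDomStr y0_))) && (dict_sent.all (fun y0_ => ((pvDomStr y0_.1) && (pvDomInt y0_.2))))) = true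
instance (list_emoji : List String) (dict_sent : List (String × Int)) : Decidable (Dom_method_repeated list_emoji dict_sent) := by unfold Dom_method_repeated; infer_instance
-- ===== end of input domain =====

-- B replaces A's two-set incremental tracking with one frequency table (count once, then add c * weight for each emoji with c ≥ 2 that has a sentiment entry); objective: simpler.

-- ===== PORT A =====
-- loop body of A's first `for` (state: sentiment, emojis_set, emojis_repeated_set);
-- `dict_sent[...]` is ported as getD _ 0: both uses are guarded by key membership, so no KeyError arises
def pvStepA (d : PySem.Dict String Int) (st : Int × PySem.Set String × PySem.Set String)
    (e : String) : Int × PySem.Set String × PySem.Set String :=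
  if PySem.Set.contains st.2.1 e && d.contains e then
    (st.1 + d.getD e 0, st.2.1, PySem.Set.add st.2.2 e)
  else
    (st.1, PySem.Set.add st.2.1 e, st.2.2)

def method_repeated (list_emoji : List String) (dict_sent : List (String × Int)) : Int :=
  let d := PySem.Dict.mk dict_sent
  let st := list_emoji.foldl (pvStepA d) (0, PySem.Set.empty, PySem.Set.empty)
  -- second loop iterates a set; the result is a sum, so it is independent of Python's hash order
  st.2.2.foldl (fun s e => s + d.getD e 0) st.1

-- ===== PORT B =====
def method_repeated_alt (list_emoji : List String) (dict_sent : List (String × Int)) : Int :=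
  let d := PySem.Dict.mk dict_sent
  let counts := list_emoji.foldl (fun cs e => cs.insert e (cs.getD e 0 + 1)) PySem.Dict.empty
  counts.items.foldl
    (fun s p => if 2 ≤ p.2 && d.contains p.1 then s + p.2 * d.getD p.1 0 else s) 0

-- ===== PRECONDITION & SPEC =====
def Spec_method_repeated (list_emoji : List String) (dict_sent : List (String × Int)) (out : Int) : Prop := out = method_repeated_alt list_emoji dict_sent
instance (list_emoji : List String) (dict_sent : List (String × Int)) (out : Int) : Decidable (Spec_method_repeated list_emoji dict_sent out) := by unfold Spec_method_repeated; infer_instance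

-- ===== CLAIM (what is proved, stated in full; the proofs are below) =====
def Claim_equal_method_repeated : Prop := ∀ (list_emoji : List String) (dict_sent : List (String × Int)), Dom_method_repeated list_emoji dict_sent → Spec_method_repeated list_emoji dict_sent (method_repeated list_emoji dict_sent)

-- ===== LEMMAS AND PROOFS =====

-- the sentiment weight of an emoji (0 if absent)
def pvVal (dict_sent : List (String × Int)) (e : String) : Int :=
  (PySem.Dict.mk dict_sent).getD e 0

-- the per-emoji contribution B assigns, as a function of the whole list's count
def pvF (dict_sent : List (String × Int)) (l : List String) (e : String) : Int :=
  if 2 ≤ (l.count e : Int) && (PySem.Dict.mk dict_sent).contains e then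
    (l.count e : Int) * pvVal dict_sent e
  else 0

def pvBsum (list_emoji : List String) (dict_sent : List (String × Int)) : Int :=
  ((PySem.Set.ofList list_emoji).map (pvF dict_sent list_emoji)).sum

lemma pv_contains_iff (s : PySem.Set String) (x : String) :
    PySem.Set.contains s x = true ↔ x ∈ s := by
  simp [PySem.Set.contains]

lemma pv_add_of_mem (s : PySem.Set String) {x : String} (hx : x ∈ s) :
    PySem.Set.add s x = s := by
  simp [PySem.Set.add, hx]

lemma pv_add_of_not_mem (s : PySem.Set String) {x : String} (hx : x ∉ s) :
    PySem.Set.add s x = s ++ [x] := by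
  simp [PySem.Set.add, hx]

lemma pv_nodup_add (s : PySem.Set String) (x : String) (h : s.Nodup) :
    (PySem.Set.add s x).Nodup := by
  by_cases hx : x ∈ s
  · rw [pv_add_of_mem s hx]; exact h
  · rw [pv_add_of_not_mem s hx]
    rw [List.nodup_append]
    refine ⟨h, List.nodup_singleton x, ?_⟩
    intro a ha b hb
    rw [List.mem_singleton] at hb
    subst hb
    exact fun e => hx (e ▸ ha)

lemma pv_ofList_append_singleton (l : List String) (x : String) :
    PySem.Set.ofList (l ++ [x]) = PySem.Set.add (PySem.Set.ofList l) x := by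
  rw [PySem.Set.ofList_eq_foldl, PySem.Set.ofList_eq_foldl, List.foldl_append]
  rfl

-- one-point update of a sum over a duplicate-free list
lemma pv_sum_update {L : List String} (hnd : L.Nodup) {x : String} (hx : x ∈ L)
    (f g : String → Int) (h : ∀ y ∈ L, y ≠ x → f y = g y) :
    (L.map g).sum = (L.map f).sum + (g x - f x) := by
  induction L with
  | nil => cases hx
  | cons a t ih =>
    rcases List.mem_cons.mp hx with rfl | hxt
    · have hft : ∀ y ∈ t, f y = g y := fun y hy =>
        h y (List.mem_cons_of_mem _ hy) (fun h' => (List.nodup_cons.mp hnd).1 (h' ▸ hy))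
      simp only [List.map_cons, List.sum_cons, List.map_congr_left hft]
      ring
    · have ha : f a = g a := h a List.mem_cons_self
        (fun h' => (List.nodup_cons.mp hnd).1 (h' ▸ hxt))
      simp only [List.map_cons, List.sum_cons,
        ih (List.nodup_cons.mp hnd).2 hxt (fun y hy hne => h y (List.mem_cons_of_mem _ hy) hne)]
      rw [ha]; ring

-- counts after appending one element
lemma pv_count_append_ne (p : List String) {x y : String} (h : y ≠ x) :
    (p ++ [x]).count y = p.count y := by
  simp [List.count_append, Ne.symm h]

lemma pv_count_append_self (p : List String) (x : String) :
    (p ++ [x]).count x = p.count x + 1 := by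
  simp [List.count_append]

-- a filtered-accumulation loop is a sum of conditional terms
lemma pv_foldl_if_sum {A : Type} (L : List A) (c : A -> Bool) (f : A -> Int) (a : Int) :
    L.foldl (fun s k => if c k then s + f k else s) a
      = a + (L.map (fun k => if c k then f k else 0)).sum := by
  induction L generalizing a with
  | nil => simp
  | cons b t ih =>
    rw [List.foldl_cons, ih]
    by_cases hb : c b = true
    · simp [hb]; ring
    · simp [hb]

-- B computes the frequency-table sum
lemma pv_B_char (l : List String) (ds : List (String × Int)) :
    method_repeated_alt l ds = pvBsum l ds := by
  unfold method_repeated_alt pvBsum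
  rw [show l.foldl (fun cs e => cs.insert e (cs.getD e 0 + 1)) PySem.Dict.empty
        = PySem.Dict.counter l from PySem.Dict.foldl_insert_getD_add_one_eq_counter l]
  simp only [PySem.Dict.items_counter, List.foldl_map]
  rw [pv_foldl_if_sum]
  rw [zero_add]
  apply congrArg
  apply List.map_congr_left
  intro y hy
  simp [pvF, pvVal]

-- invariant of A's first loop: after folding the whole list,
-- emojis_set is the set of elements, emojis_repeated_set is the duplicated ∩ keyed ones,
-- and sentiment + (weights of the repeated set) is B's frequency-table sum
lemma pv_A_inv (ds : List (String × Int)) (l : List String) :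
    (l.foldl (pvStepA (PySem.Dict.mk ds)) (0, PySem.Set.empty, PySem.Set.empty)).2.1
        = PySem.Set.ofList l
    ∧ (l.foldl (pvStepA (PySem.Dict.mk ds)) (0, PySem.Set.empty, PySem.Set.empty)).2.2.Nodup
    ∧ (∀ x, x ∈ (l.foldl (pvStepA (PySem.Dict.mk ds)) (0, PySem.Set.empty, PySem.Set.empty)).2.2
        ↔ ((PySem.Dict.mk ds).contains x = true ∧ 2 ≤ l.count x))
    ∧ (l.foldl (pvStepA (PySem.Dict.mk ds)) (0, PySem.Set.empty, PySem.Set.empty)).1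
        + ((l.foldl (pvStepA (PySem.Dict.mk ds)) (0, PySem.Set.empty, PySem.Set.empty)).2.2.map
            (pvVal ds)).sum
        = pvBsum l ds := by
  induction l using List.reverseRecOn with
  | nil =>
    refine ⟨rfl, by simp [PySem.Set.empty], by simp [PySem.Set.empty], by simp [pvBsum]⟩
  | append_singleton p x ih =>
    obtain ⟨hes, hnd, hmem, hsum⟩ := ih
    set st := p.foldl (pvStepA (PySem.Dict.mk ds)) (0, PySem.Set.empty, PySem.Set.empty) with hst
    rw [List.foldl_append, List.foldl_cons, List.foldl_nil]
    by_cases hg : (PySem.Set.contains st.2.1 x && (PySem.Dict.mk ds).contains x) = true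
    · -- repeated-occurrence branch
      rw [Bool.and_eq_true] at hg
      have hxp : x ∈ p := by
        have := (pv_contains_iff st.2.1 x).mp hg.1
        rwa [hes, PySem.Set.mem_ofList] at this
      have hdx : (PySem.Dict.mk ds).contains x = true := hg.2
      have hcnt1 : 0 < p.count x := List.count_pos_iff.mpr hxp
      have hstep : pvStepA (PySem.Dict.mk ds) st x
          = (st.1 + (PySem.Dict.mk ds).getD x 0, st.2.1, PySem.Set.add st.2.2 x) := by
        unfold pvStepA
        rw [if_pos (by rw [Bool.and_eq_true]; exact ⟨hg.1, hg.2⟩)]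
      rw [hstep]
      have hsame : PySem.Set.ofList (p ++ [x]) = PySem.Set.ofList p := by
        rw [pv_ofList_append_singleton, pv_add_of_mem _ ((PySem.Set.mem_ofList p x).mpr hxp)]
      refine ⟨?_, ?_, ?_, ?_⟩
      · rw [hsame]; exact hes
      · exact pv_nodup_add _ _ hnd
      · intro y
        rw [PySem.Set.mem_add]
        by_cases hyx : y = x
        · subst hyx
          rw [pv_count_append_self]
          constructor
          · intro _; exact ⟨hdx, by omega⟩
          · intro _; right; rfl
        · rw [pv_count_append_ne p hyx]
          constructor
          · rintro (hy | rfl)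
            · exact (hmem y).mp hy
            · exact absurd rfl hyx
          · intro h; left; exact (hmem y).mpr h
      · -- the sum
        have hupd : pvBsum (p ++ [x]) ds
            = pvBsum p ds + (pvF ds (p ++ [x]) x - pvF ds p x) := by
          unfold pvBsum
          rw [hsame]
          exact pv_sum_update (PySem.Set.nodup_ofList p)
            ((PySem.Set.mem_ofList p x).mpr hxp) (pvF ds p) (pvF ds (p ++ [x]))
            (fun y _ hyx => by
              unfold pvF; rw [pv_count_append_ne p hyx])
        rw [hupd]
        have hval : (PySem.Dict.mk ds).getD x 0 = pvVal ds x := rfl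
        by_cases hrep : x ∈ st.2.2
        · -- already in the repeated set: count p x ≥ 2
          have hc2 : 2 ≤ p.count x := ((hmem x).mp hrep).2
          rw [pv_add_of_mem _ hrep]
          have hfx : pvF ds p x = (p.count x : Int) * pvVal ds x := by
            unfold pvF
            rw [if_pos (by rw [Bool.and_eq_true, hdx]
                           exact ⟨by simp; exact_mod_cast hc2, rfl⟩)]
          have hfx' : pvF ds (p ++ [x]) x = ((p.count x : Int) + 1) * pvVal ds x := by
            unfold pvF
            rw [pv_count_append_self, if_pos (by rw [Bool.and_eq_true, hdx]
                                                 exact ⟨by simp; omega, rfl⟩)]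
            push_cast; ring
          rw [← hsum, hfx, hfx', hval]; ring
        · -- second occurrence: count p x = 1
          have hc1 : p.count x = 1 := by
            have h2 : ¬ 2 ≤ p.count x := fun h2 => hrep ((hmem x).mpr ⟨hdx, h2⟩)
            omega
          rw [pv_add_of_not_mem _ hrep]
          have hfx : pvF ds p x = 0 := by
            unfold pvF; rw [if_neg]; simp [hc1]
          have hfx' : pvF ds (p ++ [x]) x = 2 * pvVal ds x := by
            unfold pvF
            rw [pv_count_append_self, hc1,
                if_pos (by rw [Bool.and_eq_true, hdx]; exact ⟨by simp, rfl⟩)]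
            norm_num
          rw [List.map_append, List.sum_append, ← hsum, hfx, hfx', hval]
          simp [pvVal]; ring
    · -- first-occurrence (or unkeyed) branch
      have hstep : pvStepA (PySem.Dict.mk ds) st x
          = (st.1, PySem.Set.add st.2.1 x, st.2.2) := by
        simp only [pvStepA]; rw [if_neg]; exact fun h => hg h
      rw [hstep]
      have hdx_of_mem : x ∈ p → (PySem.Dict.mk ds).contains x = false := by
        intro hxp
        cases hdx : (PySem.Dict.mk ds).contains x
        · rfl
        · exfalso; apply hg
          rw [Bool.and_eq_true]
          exact ⟨(pv_contains_iff st.2.1 x).mpr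
            (by rw [hes, PySem.Set.mem_ofList]; exact hxp), hdx⟩
      refine ⟨?_, hnd, ?_, ?_⟩
      · rw [pv_ofList_append_singleton, hes]
      · intro y
        by_cases hyx : y = x
        · subst hyx
          rw [hmem y]
          by_cases hxp : y ∈ p
          · have hdx := hdx_of_mem hxp
            constructor
            · rintro ⟨hd, _⟩; rw [hdx] at hd; cases hd
            · rintro ⟨hd, _⟩; rw [hdx] at hd; cases hd
          · have h0 : p.count y = 0 := List.count_eq_zero.mpr hxp
            rw [pv_count_append_self]
            constructor
            · rintro ⟨_, h2⟩; omega
            · rintro ⟨_, h2⟩; omega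
        · rw [hmem y, pv_count_append_ne p hyx]
      · -- sum unchanged
        have hBeq : pvBsum (p ++ [x]) ds = pvBsum p ds := by
          by_cases hxp : x ∈ p
          · -- seen before but not in the dict: its contribution is 0 on both sides
            have hdx := hdx_of_mem hxp
            unfold pvBsum
            rw [pv_ofList_append_singleton,
                pv_add_of_mem _ ((PySem.Set.mem_ofList p x).mpr hxp)]
            congr 1
            apply List.map_congr_left
            intro y hy
            by_cases hyx : y = x
            · subst hyx
              unfold pvF
              rw [if_neg (by rw [hdx]; simp), if_neg (by rw [hdx]; simp)]
            · unfold pvF; rw [pv_count_append_ne p hyx]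
          · -- genuinely new element: its new set entry has count 1, contributing 0
            unfold pvBsum
            rw [pv_ofList_append_singleton,
                pv_add_of_not_mem _ (fun h => hxp ((PySem.Set.mem_ofList p x).mp h)),
                List.map_append, List.sum_append]
            have hterm : pvF ds (p ++ [x]) x = 0 := by
              unfold pvF
              rw [pv_count_append_self, List.count_eq_zero.mpr hxp, if_neg]
              simp
            have hcong : (PySem.Set.ofList p).map (pvF ds (p ++ [x]))
                = (PySem.Set.ofList p).map (pvF ds p) := by
              apply List.map_congr_left
              intro y hy
              have hyx : y ≠ x := fun h => hxp (h ▸ ((PySem.Set.mem_ofList p y).mp hy))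
              unfold pvF; rw [pv_count_append_ne p hyx]
            simp [hterm, hcong]
        rw [hBeq, ← hsum]

-- ===== VERDICT (by name: the statement is the Claim_ definition above) =====
theorem method_repeated_spec : Claim_equal_method_repeated := by
  intro l ds _
  unfold Spec_method_repeated method_repeated
  obtain ⟨hes, hnd, hmem, hsum⟩ := pv_A_inv ds l
  rw [PySem.List.foldl_add (g := fun e => (PySem.Dict.mk ds).getD e 0)]
  rw [pv_B_char]
  exact hsum
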